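-- pv_equiv track=rewrite | github.com/BrettRey/English_Passive_Voice_as_HPC | scripts/build_study1_pilot.py | manifest_lines
-- ===== SOURCE A (Python) =====
-- CORPORA = ("ewt", "gum")
--
-- def manifest_lines(fit_rows: list[dict[str, str]], boundary_rows: list[dict[str, str]], seed: int) -> list[str]:
--     lines = [
--         "Study 1 reliability pilots",
--         f"seed={seed}",
--         "fit_gate targets: 25 core + 25 foil per corpus",
--         "boundary_probe targets: 2 get + 2 reduced_embedded + 4 manual_probe per corpus",
--         f"fit_gate_total={len(fit_rows)}",
--         f"boundary_probe_total={len(boundary_rows)}",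
--     ]
--     for corpus in CORPORA:
--         fit_corpus = [row for row in fit_rows if row["pilot_corpus"] == corpus]
--         core_count = sum(row["pilot_class"] == "core" for row in fit_corpus)
--         foil_count = sum(row["pilot_class"] == "foil" for row in fit_corpus)
--         boundary_corpus = [row for row in boundary_rows if row["pilot_corpus"] == corpus]
--         lines.append(f"{corpus} fit_gate: core={core_count} foil={foil_count}")
--         stream_counts: dict[str, int] = {}
--         for row in boundary_corpus:
--             stream = row["pilot_stream"]
--             stream_counts[stream] = stream_counts.get(stream, 0) + 1
--         lines.append(
--             f"{corpus} boundary_probe: "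
--             f"get={stream_counts.get('peripheral_get', 0)} "
--             f"reduced={stream_counts.get('peripheral_reduced_embedded', 0)} "
--             f"manual={stream_counts.get('peripheral_manual_probe', 0)}"
--         )
--     return lines
-- ===== SOURCE B (Python) =====
-- CORPORA = ("ewt", "gum")
--
--
-- def manifest_lines(fit_rows: list[dict[str, str]], boundary_rows: list[dict[str, str]], seed: int) -> list[str]:
--     fit_counts: dict[tuple[str, str], int] = {}
--     for row in fit_rows:
--         corpus = row["pilot_corpus"]
--         if corpus in CORPORA:
--             key = (corpus, row["pilot_class"])
--             fit_counts[key] = fit_counts.get(key, 0) + 1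
--     stream_counts: dict[tuple[str, str], int] = {}
--     for row in boundary_rows:
--         corpus = row["pilot_corpus"]
--         if corpus in CORPORA:
--             key = (corpus, row["pilot_stream"])
--             stream_counts[key] = stream_counts.get(key, 0) + 1
--     lines = [
--         "Study 1 reliability pilots",
--         f"seed={seed}",
--         "fit_gate targets: 25 core + 25 foil per corpus",
--         "boundary_probe targets: 2 get + 2 reduced_embedded + 4 manual_probe per corpus",
--         f"fit_gate_total={len(fit_rows)}",
--         f"boundary_probe_total={len(boundary_rows)}",
--     ]
--     for corpus in CORPORA:
--         lines.append(
--             f"{corpus} fit_gate: "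
--             f"core={fit_counts.get((corpus, 'core'), 0)} "
--             f"foil={fit_counts.get((corpus, 'foil'), 0)}"
--         )
--         lines.append(
--             f"{corpus} boundary_probe: "
--             f"get={stream_counts.get((corpus, 'peripheral_get'), 0)} "
--             f"reduced={stream_counts.get((corpus, 'peripheral_reduced_embedded'), 0)} "
--             f"manual={stream_counts.get((corpus, 'peripheral_manual_probe'), 0)}"
--         )
--     return lines
-- ===== Notes on version B (the rewrite author's own statement) =====
-- stated objective: alternative
-- what changed: Replaces A's four per-corpus rescans (two filters, two boolean sums, plus a per-corpus dict build) with two single passes that build nested (corpus,label) counter dicts up front, from which every report line is read with .get(...,0).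
import Mathlib
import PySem

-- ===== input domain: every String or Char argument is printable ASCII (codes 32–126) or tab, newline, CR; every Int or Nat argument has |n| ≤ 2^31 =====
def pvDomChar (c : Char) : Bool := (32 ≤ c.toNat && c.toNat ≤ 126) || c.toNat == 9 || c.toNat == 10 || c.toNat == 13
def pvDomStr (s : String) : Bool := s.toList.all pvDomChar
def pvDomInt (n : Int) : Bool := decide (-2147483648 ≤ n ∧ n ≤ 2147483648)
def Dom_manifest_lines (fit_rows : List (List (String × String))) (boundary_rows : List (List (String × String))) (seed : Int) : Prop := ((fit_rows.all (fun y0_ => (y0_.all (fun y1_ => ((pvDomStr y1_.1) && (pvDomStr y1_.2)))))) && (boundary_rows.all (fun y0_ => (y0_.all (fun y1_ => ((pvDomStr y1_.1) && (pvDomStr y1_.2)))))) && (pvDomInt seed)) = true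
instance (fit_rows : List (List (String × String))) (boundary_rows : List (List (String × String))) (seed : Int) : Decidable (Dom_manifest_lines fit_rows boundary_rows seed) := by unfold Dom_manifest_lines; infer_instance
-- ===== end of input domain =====

-- B replaces A's four per-corpus rescans of the row lists by two single passes that build
-- nested (corpus, label) counters, then reads the report numbers from those tables (objective: alternative one-pass decomposition).

-- ===== PORT A =====
def CORPORA_pv : List String := ["ewt", "gum"]

/-- row[k]: first-match association-list lookup. The "" default is only reached where the
Python raises KeyError; those inputs are excluded by Pre_manifest_lines. -/
def rowGet (row : List (String × String)) (k : String) : String :=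
  ((row.find? (fun p => p.1 == k)).map (·.2)).getD ""

def rowHas (row : List (String × String)) (k : String) : Bool :=
  (row.find? (fun p => p.1 == k)).isSome

def manifest_lines (fit_rows : List (List (String × String))) (boundary_rows : List (List (String × String))) (seed : Int) : List String :=
  let lines : List String := [
    "Study 1 reliability pilots",
    "seed=" ++ PySem.Int.toStr seed,
    "fit_gate targets: 25 core + 25 foil per corpus",
    "boundary_probe targets: 2 get + 2 reduced_embedded + 4 manual_probe per corpus",
    "fit_gate_total=" ++ PySem.Int.toStr (fit_rows.length : Int),
    "boundary_probe_total=" ++ PySem.Int.toStr (boundary_rows.length : Int)]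
  CORPORA_pv.foldl (fun lines corpus =>
    let fit_corpus := fit_rows.filter (fun row => rowGet row "pilot_corpus" == corpus)
    let core_count : Int := (fit_corpus.map (fun row => if rowGet row "pilot_class" == "core" then (1 : Int) else 0)).sum
    let foil_count : Int := (fit_corpus.map (fun row => if rowGet row "pilot_class" == "foil" then (1 : Int) else 0)).sum
    let boundary_corpus := boundary_rows.filter (fun row => rowGet row "pilot_corpus" == corpus)
    let lines := lines ++ [corpus ++ " fit_gate: core=" ++ PySem.Int.toStr core_count ++ " foil=" ++ PySem.Int.toStr foil_count]
    let stream_counts : PySem.Dict String Int := boundary_corpus.foldl (fun d row =>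
      let stream := rowGet row "pilot_stream"
      d.insert stream (d.getD stream 0 + 1)) PySem.Dict.empty
    lines ++ [corpus ++ " boundary_probe: get=" ++ PySem.Int.toStr (stream_counts.getD "peripheral_get" 0)
      ++ " reduced=" ++ PySem.Int.toStr (stream_counts.getD "peripheral_reduced_embedded" 0)
      ++ " manual=" ++ PySem.Int.toStr (stream_counts.getD "peripheral_manual_probe" 0)]) lines

-- ===== PORT B =====
/-- B's single counting pass: one (corpus, payload-label) counter dict per row list. -/
def countByKey (rows : List (List (String × String))) (payload : String) : PySem.Dict (String × String) Int :=
  rows.foldl (fun d row =>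
    let corpus := rowGet row "pilot_corpus"
    if CORPORA_pv.contains corpus then
      let key := (corpus, rowGet row payload)
      d.insert key (d.getD key 0 + 1)
    else d) PySem.Dict.empty

def manifest_lines_alt (fit_rows : List (List (String × String))) (boundary_rows : List (List (String × String))) (seed : Int) : List String :=
  let fit_counts := countByKey fit_rows "pilot_class"
  let stream_counts := countByKey boundary_rows "pilot_stream"
  let lines : List String := [
    "Study 1 reliability pilots",
    "seed=" ++ PySem.Int.toStr seed,
    "fit_gate targets: 25 core + 25 foil per corpus",
    "boundary_probe targets: 2 get + 2 reduced_embedded + 4 manual_probe per corpus",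
    "fit_gate_total=" ++ PySem.Int.toStr (fit_rows.length : Int),
    "boundary_probe_total=" ++ PySem.Int.toStr (boundary_rows.length : Int)]
  CORPORA_pv.foldl (fun lines corpus =>
    let lines := lines ++ [corpus ++ " fit_gate: core=" ++ PySem.Int.toStr (fit_counts.getD (corpus, "core") 0)
      ++ " foil=" ++ PySem.Int.toStr (fit_counts.getD (corpus, "foil") 0)]
    lines ++ [corpus ++ " boundary_probe: get=" ++ PySem.Int.toStr (stream_counts.getD (corpus, "peripheral_get") 0)
      ++ " reduced=" ++ PySem.Int.toStr (stream_counts.getD (corpus, "peripheral_reduced_embedded") 0)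
      ++ " manual=" ++ PySem.Int.toStr (stream_counts.getD (corpus, "peripheral_manual_probe") 0)]) lines

-- ===== PRECONDITION & SPEC =====
-- Pre_ excludes exactly the inputs where Python A raises KeyError: a row without "pilot_corpus",
-- or a row whose corpus is "ewt"/"gum" but which lacks its payload key ("pilot_class" / "pilot_stream").
def Pre_manifest_lines (fit_rows : List (List (String × String))) (boundary_rows : List (List (String × String))) (seed : Int) : Prop :=
  (∀ row ∈ fit_rows, rowHas row "pilot_corpus" = true ∧
    (CORPORA_pv.contains (rowGet row "pilot_corpus") = true → rowHas row "pilot_class" = true)) ∧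
  (∀ row ∈ boundary_rows, rowHas row "pilot_corpus" = true ∧
    (CORPORA_pv.contains (rowGet row "pilot_corpus") = true → rowHas row "pilot_stream" = true))

instance (fit_rows : List (List (String × String))) (boundary_rows : List (List (String × String))) (seed : Int) : Decidable (Pre_manifest_lines fit_rows boundary_rows seed) := by unfold Pre_manifest_lines; infer_instance

def pvWitness_manifest_lines : (List (List (String × String))) × (List (List (String × String))) × Int :=
  ([[("pilot_corpus", "ewt"), ("pilot_class", "core")], [("pilot_corpus", "other")]],
   [[("pilot_corpus", "gum"), ("pilot_stream", "peripheral_get")]], 7)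

def Spec_manifest_lines (fit_rows : List (List (String × String))) (boundary_rows : List (List (String × String))) (seed : Int) (out : List String) : Prop := out = manifest_lines_alt fit_rows boundary_rows seed
instance (fit_rows : List (List (String × String))) (boundary_rows : List (List (String × String))) (seed : Int) (out : List String) : Decidable (Spec_manifest_lines fit_rows boundary_rows seed out) := by unfold Spec_manifest_lines; infer_instance

-- ===== CLAIM (what is proved, stated in full; the proofs are below) =====
def Claim_equal_manifest_lines : Prop := ∀ (fit_rows : List (List (String × String))) (boundary_rows : List (List (String × String))) (seed : Int), Dom_manifest_lines fit_rows boundary_rows seed → Pre_manifest_lines fit_rows boundary_rows seed → Spec_manifest_lines fit_rows boundary_rows seed (manifest_lines fit_rows boundary_rows seed)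

-- ===== LEMMAS AND PROOFS =====

/-- B's guarded counter fold, with a general accumulator. -/
lemma countByKey_fold (rows : List (List (String × String))) (payload c s : String)
    (hc : CORPORA_pv.contains c = true) (d : PySem.Dict (String × String) Int) :
    (rows.foldl (fun d row =>
      let corpus := rowGet row "pilot_corpus"
      if CORPORA_pv.contains corpus then
        let key := (corpus, rowGet row payload)
        d.insert key (d.getD key 0 + 1)
      else d) d).getD (c, s) 0
    = d.getD (c, s) 0
      + ((rows.filter (fun row => rowGet row "pilot_corpus" == c)).countP
          (fun row => rowGet row payload == s) : Int) := by
  induction rows generalizing d with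
  | nil => simp
  | cons r t ih =>
    simp only [List.foldl_cons, List.filter_cons]
    by_cases hrc : rowGet r "pilot_corpus" = c
    · rw [hrc]
      simp only [hc, if_pos, beq_self_eq_true]
      rw [ih, PySem.Dict.getD_insert, List.countP_cons]
      by_cases hs : rowGet r payload = s
      · rw [hs]
        simp only [beq_self_eq_true, if_true]
        push_cast
        ring
      · rw [if_neg (fun h => hs (congrArg Prod.snd h).symm)]
        simp [hs]
    · have hne : (rowGet r "pilot_corpus" == c) = false := by simp [hrc]
      rw [hne]
      simp only [if_false, Bool.false_eq_true]
      by_cases hmem : CORPORA_pv.contains (rowGet r "pilot_corpus") = true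
      · simp only [hmem, if_true]
        rw [ih, PySem.Dict.getD_insert, if_neg (fun h => hrc (congrArg Prod.fst h).symm)]
      · simp only [Bool.not_eq_true] at hmem
        simp only [hmem, Bool.false_eq_true, if_false]
        exact ih d

lemma countByKey_getD (rows : List (List (String × String))) (payload c s : String)
    (hc : CORPORA_pv.contains c = true) :
    (countByKey rows payload).getD (c, s) 0
    = ((rows.filter (fun row => rowGet row "pilot_corpus" == c)).countP
        (fun row => rowGet row payload == s) : Int) := by
  unfold countByKey
  rw [countByKey_fold rows payload c s hc]
  simp

/-- A's per-corpus stream dict: getD = countP (general accumulator). -/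
lemma streamDict_fold (rows : List (List (String × String))) (v : String)
    (d : PySem.Dict String Int) :
    ((rows.foldl (fun d row =>
        let stream := rowGet row "pilot_stream"
        d.insert stream (d.getD stream 0 + 1)) d).getD v 0)
    = d.getD v 0 + (rows.countP (fun row => rowGet row "pilot_stream" == v) : Int) := by
  induction rows generalizing d with
  | nil => simp
  | cons r t ih =>
    simp only [List.foldl_cons, List.countP_cons]
    rw [ih, PySem.Dict.getD_insert]
    by_cases hs : rowGet r "pilot_stream" = v
    · rw [hs]
      simp only [beq_self_eq_true, if_true]
      push_cast
      ring
    · rw [if_neg (fun h => hs h.symm)]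
      simp [hs]

lemma streamDict_getD (rows : List (List (String × String))) (v : String) :
    ((rows.foldl (fun d row =>
        let stream := rowGet row "pilot_stream"
        d.insert stream (d.getD stream 0 + 1)) (PySem.Dict.empty (κ := String) (ν := Int))).getD v 0)
    = (rows.countP (fun row => rowGet row "pilot_stream" == v) : Int) := by
  rw [streamDict_fold]
  simp

/-- A's 0/1 sum is a countP. -/
lemma sum_ite_eq_countP (rows : List (List (String × String))) (k v : String) :
    ((rows.map (fun row => if rowGet row k == v then (1 : Int) else 0)).sum)
    = (rows.countP (fun row => rowGet row k == v) : Int) := by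
  induction rows with
  | nil => simp
  | cons r t ih =>
    simp only [List.map_cons, List.sum_cons, List.countP_cons, ih]
    by_cases h : rowGet r k = v
    · simp [h]
      ring
    · simp [h]

-- ===== VERDICT (by name: the statement is the Claim_ definition above) =====
theorem manifest_lines_spec : Claim_equal_manifest_lines := by
  intro fit_rows boundary_rows seed _ _
  unfold Spec_manifest_lines manifest_lines manifest_lines_alt
  simp only [CORPORA_pv, List.foldl_cons, List.foldl_nil]
  simp only [countByKey_getD _ _ "ewt" _ (by decide), countByKey_getD _ _ "gum" _ (by decide),
    streamDict_getD, sum_ite_eq_countP]
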